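-- pv_equiv track=rewrite | github.com/RationalPoint/reverse | reverse.py | recursion_start
-- ===== SOURCE A (Python) =====
-- from collections import defaultdict
--
-- def xgcd(a, b):
--   r"""
--   Return g, x, y such that ax + by = g
--
--   INPUT:
--
--   - ``a, b`` -- ints, not both zero
--
--   OUTPUT:
--
--   - A triple of ints `(g,x,y)` such that `g` is the greatest common divisor of
--     `a` and `b` and `ax + by = g`.
--
--   EXAMPLES::
--
--     >>> xgcd(4,10)
--     (2, -2, 1)
--
--     >>> xgcd(123,4567)
--     (1, 854, -23)
--
--   """
--   if a == 0 and b == 0: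
--     raise ValueError('gcd does not exist')
--   if a == 0 and b > 0:
--     return b, 0, 1
--   elif a == 0 and b < 0:
--     return -b,0,-1
--   else:
--     g, y, x = xgcd(b % a, a)
--     return g, x - (b // a) * y, y
--
-- def gcd(a,b):
--   r"""
--   Return the greatest common divisor of a and b
--   """
--   g,_,_ = xgcd(a,b)
--   return g
--
-- def recursion_start(base, a=None):
--   r"""
--   Find solutions to the equations for starting the recursion in [1], Section 5.1
--
--   INPUT:
--
--   - ``base`` -- an int > 1
--
--   - ``a`` -- optional int in the interval `[1,base)`
--
--   OUTPUT:
--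
--   - A dict whose keys are values `a` in the interval `[1,base)` such that
--     `gcd(a-1, base-1) = 1` and whose values are 4-tuples `(b_r,b_0,l,r)`
--     such that
--
--     * `0 < b_r < base`;
--
--     * `0 < b_0 < base - a`;
--
--     * `0 \le l,r < a` satisfy `b_r = ab_0 + r base` and `l = a + b_0 - ab_r`.
--
--     If no such 4-tuple exists, that value of `a` will not appear as a key.
--
--     If `a` is provided as an argument, then only that key will be considered
--     when constructing the output dict.
--
--   EXAMPLES::
--
--     >>> recursion_start(10)
--     {2: [(4, 7, 1, 1)], 3: [(2, 4, 1, 1)]}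
--     >>> recursion_start(10, 2)
--     {2: [(4, 7, 1, 1)]}
--     >>> recursion_start(10, 5)
--     {}
--
--   """
--   a_vals = defaultdict(lambda:[])
--   if a is None:
--     aa = range(1,base)
--   else:
--     aa = [a]
--   for a in aa:
--     if gcd(a-1,base-1) != 1: continue
--     for b0 in range(1,base-a):
--       br = (a*b0) % base
--       l = a + b0 - a*br # Forces a*br + l < base
--       if l < 0 or l >= a: continue
--       r = (a*b0 - br) // base # Satisfies 0 <= r < a
--       a_vals[a].append((br,b0,l,r))
--   return dict(a_vals)
-- ===== SOURCE B (Python) =====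
-- def _gcd(x, y):
--   r"""Iterative Euclid; returns the nonnegative gcd."""
--   while y:
--     x, y = y, x % y
--   return abs(x)
--
-- def _xgcd(x, y):
--   r"""Iterative extended Euclid: returns (g, u, v) with x*u + y*v = g = gcd(x, y) (g >= 0 for x, y >= 0)."""
--   old_r, r = x, y
--   old_s, s = 1, 0
--   old_t, t = 0, 1
--   while r:
--     qq = old_r // r
--     old_r, r = r, old_r - qq * r
--     old_s, s = s, old_s - qq * s
--     old_t, t = t, old_t - qq * t
--   return old_r, old_s, old_t
--
-- def recursion_start(base, a=None):
--   r"""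
--   Same output as the original, but instead of scanning every b0 in [1, base-a),
--   write b0 = a*q + s with q = b0 // a.  The acceptance condition is exactly
--   (a*b0) % base == q + 1, a linear congruence in b0 for each fixed q, which is
--   solved directly with the extended Euclid algorithm; only the O(base/a)
--   values of q are visited and only actual solutions are enumerated.
--   """
--   out = {}
--   candidates = range(1, base) if a is None else [a]
--   for a in candidates:
--     if not (1 <= a < base):
--       continue  # no 4-tuple can satisfy 0 <= l < a and 1 <= b0 < base - a
--     if _gcd(a - 1, base - 1) != 1:
--       continue
--     g, u, _ = _xgcd(a, base)
--     step = base // g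
--     sols = []
--     for q in range((base - a - 1) // a + 1):
--       rhs = q + 1
--       if rhs % g == 0:
--         lo = max(a * q, 1)
--         hi = min(a * q + a - 1, base - a - 1)
--         x0 = (u * (rhs // g)) % step
--         first = lo + (x0 - lo) % step
--         for b0 in range(first, hi + 1, step):
--           sols.append((q + 1, b0, b0 - a * q, (a * b0 - rhs) // base))
--     if sols:
--       out[a] = sols
--   return out
-- ===== Notes on version B (the rewrite author's own statement) =====
-- stated objective: faster
-- what changed: Instead of scanning every b0 in [1, base-a) and testing (a*b0) % base, B writes b0 = a*q + s and, for each of the ~base/a quotient blocks, solves the linear congruence a*b0 ≡ q+1 (mod base) directly with the extended Euclidean algorithm, enumerating only actual solutions.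
import Mathlib
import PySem

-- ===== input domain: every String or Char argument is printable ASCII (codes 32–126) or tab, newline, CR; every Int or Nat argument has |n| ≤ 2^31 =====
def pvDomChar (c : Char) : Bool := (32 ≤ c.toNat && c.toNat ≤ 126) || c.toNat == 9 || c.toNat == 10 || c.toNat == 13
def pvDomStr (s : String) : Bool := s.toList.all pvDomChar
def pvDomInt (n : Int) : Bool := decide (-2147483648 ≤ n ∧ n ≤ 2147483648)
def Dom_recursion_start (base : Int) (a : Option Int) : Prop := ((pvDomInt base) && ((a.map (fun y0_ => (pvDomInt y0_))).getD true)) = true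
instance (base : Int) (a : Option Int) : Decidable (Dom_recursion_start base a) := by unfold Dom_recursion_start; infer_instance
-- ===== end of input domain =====

-- B replaces A's scan of every b0 in [1, base-a) by directly solving the linear congruence
-- a*b0 ≡ q+1 (mod base) on each quotient block b0 ∈ [a*q, a*q+a), with extended Euclid; faster.

-- ===== PORT A =====
-- The recursion xgcd(b % a, a) strictly decreases |a|, so |a| + 1 steps of fuel always
-- suffice; the fuel only makes the same computation total (the 0-fuel branch is unreachable).
def pyXgcdF : Nat → Int → Int → Int × Int × Int
  | 0, _, _ => (0, 0, 0)
  | fuel + 1, a, b =>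
    if a = 0 ∧ b = 0 then (0, 0, 0)  -- Python raises ValueError here (outside Pre_)
    else if a = 0 ∧ 0 < b then (b, 0, 1)
    else if a = 0 ∧ b < 0 then (-b, 0, -1)
    else
      let r := pyXgcdF fuel (PySem.Int.mod b a) a
      (r.1, r.2.2 - (PySem.Int.floordiv b a) * r.2.1, r.2.1)

def pyXgcd (a b : Int) : Int × Int × Int := pyXgcdF (a.natAbs + 1) a b

def pyGcd (a b : Int) : Int := (pyXgcd a b).1

def recursion_start (base : Int) (a : Option Int) : List (Int × List (List Int)) :=
  let aa : List Int :=
    match a with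
    | none => PySem.List.pyRange 1 base 1
    | some x => [x]
  (aa.foldl (fun d a =>
    if pyGcd (a - 1) (base - 1) ≠ 1 then d
    else
      (PySem.List.pyRange 1 (base - a) 1).foldl (fun d b0 =>
        let br := PySem.Int.mod (a * b0) base
        let l := a + b0 - a * br
        if l < 0 ∨ l ≥ a then d
        else
          let r := PySem.Int.floordiv (a * b0 - br) base
          d.insert a (d.getD a [] ++ [[br, b0, l, r]])) d) PySem.Dict.empty).items

-- ===== PORT B =====
-- The loops of _gcd and _xgcd strictly decrease |y| (resp. |r|) each iteration, so
-- |y| + 1 (resp. |r| + 1) steps of fuel always suffice; the fuel only makes the same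
-- computation total (the 0-fuel branches are unreachable).
def altGcdF : Nat → Int → Int → Int
  | 0, _, _ => 0
  | fuel + 1, x, y => if y = 0 then |x| else altGcdF fuel y (PySem.Int.mod x y)

def altGcd (x y : Int) : Int := altGcdF (y.natAbs + 1) x y

def altXgcdLoopF : Nat → Int → Int → Int → Int → Int → Int → Int × Int × Int
  | 0, _, _, _, _, _, _ => (0, 0, 0)
  | fuel + 1, oldr, r, olds, s, oldt, t =>
    if r = 0 then (oldr, olds, oldt)
    else
      let qq := PySem.Int.floordiv oldr r
      altXgcdLoopF fuel r (oldr - qq * r) s (olds - qq * s) t (oldt - qq * t)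

def altXgcd (x y : Int) : Int × Int × Int := altXgcdLoopF (y.natAbs + 1) x y 1 0 0 1

def recursion_start_alt (base : Int) (a : Option Int) : List (Int × List (List Int)) :=
  let candidates : List Int :=
    match a with
    | none => PySem.List.pyRange 1 base 1
    | some x => [x]
  (candidates.foldl (fun out a =>
    if ¬(1 ≤ a ∧ a < base) then out
    else if altGcd (a - 1) (base - 1) ≠ 1 then out
    else
      let r := altXgcd a base
      let g := r.1
      let u := r.2.1
      let step := PySem.Int.floordiv base g
      let sols := (PySem.List.pyRange 0 (PySem.Int.floordiv (base - a - 1) a + 1) 1).foldl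
        (fun sols q =>
          let rhs := q + 1
          if PySem.Int.mod rhs g = 0 then
            let lo := max (a * q) 1
            let hi := min (a * q + a - 1) (base - a - 1)
            let x0 := PySem.Int.mod (u * PySem.Int.floordiv rhs g) step
            let first := lo + PySem.Int.mod (x0 - lo) step
            (PySem.List.pyRange first (hi + 1) step).foldl
              (fun sols b0 => sols ++ [[q + 1, b0, b0 - a * q, PySem.Int.floordiv (a * b0 - rhs) base]]) sols
          else sols) []
      if sols ≠ [] then out.insert a sols else out) PySem.Dict.empty).items

-- ===== PRECONDITION & SPEC =====
-- Pre_ excludes exactly the inputs where Python A raises: base = 1 with a = 1 (ValueError from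
-- gcd(0, 0)) and base = 0 with a ≤ -2 (ZeroDivisionError from % base inside a nonempty loop).
def Pre_recursion_start (base : Int) (a : Option Int) : Prop :=
  ¬(base = 1 ∧ a = some 1) ∧ ¬(base = 0 ∧ a ≠ none ∧ a.getD 0 ≤ -2)
instance (base : Int) (a : Option Int) : Decidable (Pre_recursion_start base a) := by
  unfold Pre_recursion_start; infer_instance

def pvWitness_recursion_start : Int × Option Int := (10, none)

def Spec_recursion_start (base : Int) (a : Option Int) (out : List (Int × List (List Int))) : Prop :=
  out = recursion_start_alt base a
instance (base : Int) (a : Option Int) (out : List (Int × List (List Int))) :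
    Decidable (Spec_recursion_start base a out) := by unfold Spec_recursion_start; infer_instance

-- ===== CLAIM (what is proved, stated in full; the proofs are below) =====
def Claim_equal_recursion_start : Prop :=
  ∀ (base : Int) (a : Option Int), Dom_recursion_start base a → Pre_recursion_start base a →
    Spec_recursion_start base a (recursion_start base a)

-- ===== LEMMAS AND PROOFS =====

-- proof-side names for the two loop bodies (definitionally the lambdas of the ports)
def stepA (base : Int) : PySem.Dict Int (List (List Int)) → Int → PySem.Dict Int (List (List Int)) :=
  fun d a =>
    if pyGcd (a - 1) (base - 1) ≠ 1 then d
    else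
      (PySem.List.pyRange 1 (base - a) 1).foldl (fun d b0 =>
        let br := PySem.Int.mod (a * b0) base
        let l := a + b0 - a * br
        if l < 0 ∨ l ≥ a then d
        else
          let r := PySem.Int.floordiv (a * b0 - br) base
          d.insert a (d.getD a [] ++ [[br, b0, l, r]])) d

def stepB (base : Int) : PySem.Dict Int (List (List Int)) → Int → PySem.Dict Int (List (List Int)) :=
  fun out a =>
    if ¬(1 ≤ a ∧ a < base) then out
    else if altGcd (a - 1) (base - 1) ≠ 1 then out
    else
      let r := altXgcd a base
      let g := r.1
      let u := r.2.1
      let step := PySem.Int.floordiv base g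
      let sols := (PySem.List.pyRange 0 (PySem.Int.floordiv (base - a - 1) a + 1) 1).foldl
        (fun sols q =>
          let rhs := q + 1
          if PySem.Int.mod rhs g = 0 then
            let lo := max (a * q) 1
            let hi := min (a * q + a - 1) (base - a - 1)
            let x0 := PySem.Int.mod (u * PySem.Int.floordiv rhs g) step
            let first := lo + PySem.Int.mod (x0 - lo) step
            (PySem.List.pyRange first (hi + 1) step).foldl
              (fun sols b0 => sols ++ [[q + 1, b0, b0 - a * q, PySem.Int.floordiv (a * b0 - rhs) base]]) sols
          else sols) []
      if sols ≠ [] then out.insert a sols else out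

-- A's acceptance data for one candidate a = x
def brA (base x b0 : Int) : Int := PySem.Int.mod (x * b0) base
def lA (base x b0 : Int) : Int := x + b0 - x * brA base x b0
def fA (base x b0 : Int) : List Int :=
  [brA base x b0, b0, lA base x b0, PySem.Int.floordiv (x * b0 - brA base x b0) base]
abbrev PA (base x b0 : Int) : Prop := ¬(lA base x b0 < 0 ∨ lA base x b0 ≥ x)
def LA (base x : Int) : List (List Int) :=
  ((PySem.List.pyRange 1 (base - x) 1).filter (fun b0 => decide (PA base x b0))).map (fA base x)

-- B's solution list for one candidate a = x
def LB (base x : Int) : List (List Int) :=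
  (PySem.List.pyRange 0 (PySem.Int.floordiv (base - x - 1) x + 1) 1).foldl
    (fun sols q =>
      let rhs := q + 1
      if PySem.Int.mod rhs (altXgcd x base).1 = 0 then
        let lo := max (x * q) 1
        let hi := min (x * q + x - 1) (base - x - 1)
        let x0 := PySem.Int.mod ((altXgcd x base).2.1 * PySem.Int.floordiv rhs (altXgcd x base).1)
          (PySem.Int.floordiv base (altXgcd x base).1)
        let first := lo + PySem.Int.mod (x0 - lo) (PySem.Int.floordiv base (altXgcd x base).1)
        (PySem.List.pyRange first (hi + 1) (PySem.Int.floordiv base (altXgcd x base).1)).foldl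
          (fun sols b0 => sols ++ [[q + 1, b0, b0 - x * q, PySem.Int.floordiv (x * b0 - rhs) base]]) sols
      else sols) []

-- gcd facts -------------------------------------------------------------
lemma gcd_mod_right (a b : Int) : Int.gcd b (PySem.Int.mod a b) = Int.gcd b a := by
  have h := PySem.Int.floordiv_mul_add_mod a b
  have h2 : PySem.Int.mod a b = a + -(PySem.Int.floordiv a b) * b := by linarith
  rw [h2, Int.gcd_add_mul_right_right]

lemma natAbs_mod_lt (a b : Int) (hb : b ≠ 0) : (PySem.Int.mod a b).natAbs < b.natAbs := by
  rcases lt_trichotomy b 0 with h | h | h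
  · have := PySem.Int.mod_neg_bounds a h; omega
  · exact absurd h hb
  · have h1 := PySem.Int.mod_nonneg a h
    have h2 := PySem.Int.mod_lt a h
    omega

lemma altGcdF_eq : ∀ (fuel : Nat) (x y : Int), y.natAbs < fuel →
    altGcdF fuel x y = ((Int.gcd x y : Nat) : Int) := by
  intro fuel
  induction fuel with
  | zero => intro x y hf; omega
  | succ fuel ih =>
    intro x y hf
    show (if y = 0 then |x| else altGcdF fuel y (PySem.Int.mod x y)) = _
    split_ifs with h
    · subst h; rw [Int.gcd_zero_right]; exact Int.abs_eq_natAbs x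
    · rw [ih y (PySem.Int.mod x y) (by have := natAbs_mod_lt x y h; omega),
        gcd_mod_right, Int.gcd_comm]

lemma altGcd_eq (x y : Int) : altGcd x y = ((Int.gcd x y : Nat) : Int) :=
  altGcdF_eq (y.natAbs + 1) x y (by omega)

lemma pyXgcdF_gcd : ∀ (fuel : Nat) (a b : Int), 0 ≤ a → a.natAbs < fuel →
    ¬(a = 0 ∧ b = 0) → (pyXgcdF fuel a b).1 = ((Int.gcd a b : Nat) : Int) := by
  intro fuel
  induction fuel with
  | zero => intro a b _ hf _; omega
  | succ fuel ih =>
    intro a b ha hf h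
    show ((if a = 0 ∧ b = 0 then ((0, 0, 0) : Int × Int × Int)
      else if a = 0 ∧ 0 < b then (b, 0, 1)
      else if a = 0 ∧ b < 0 then (-b, 0, -1)
      else
        let r := pyXgcdF fuel (PySem.Int.mod b a) a
        (r.1, r.2.2 - (PySem.Int.floordiv b a) * r.2.1, r.2.1))).1 = _
    split_ifs with c1 c2
    · obtain ⟨c1a, c1b⟩ := c1; subst c1a
      show b = ((Int.gcd 0 b : Nat) : Int)
      rw [Int.gcd_zero_left]; omega
    · obtain ⟨c2a, c2b⟩ := c2; subst c2a
      show -b = ((Int.gcd 0 b : Nat) : Int)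
      rw [Int.gcd_zero_left]; omega
    · have ha' : 0 < a := by
        rcases lt_or_eq_of_le ha with h' | h'
        · exact h'
        · exfalso; rcases lt_trichotomy b 0 with hb | hb | hb
          · exact c2 ⟨h'.symm, hb⟩
          · exact h ⟨h'.symm, hb⟩
          · exact c1 ⟨h'.symm, hb⟩
      show (pyXgcdF fuel (PySem.Int.mod b a) a).1 = ((Int.gcd a b : Nat) : Int)
      have hm1 : 0 ≤ PySem.Int.mod b a := PySem.Int.mod_nonneg b ha'
      have hrec := ih (PySem.Int.mod b a) a hm1
        (by have := natAbs_mod_lt b a (by omega); omega)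
        (by rintro ⟨_, h2⟩; omega)
      rw [hrec]
      have hg : Int.gcd (PySem.Int.mod b a) a = Int.gcd a b := by
        rw [Int.gcd_comm]; exact gcd_mod_right b a
      rw [hg]

lemma pyGcd_eq (a b : Int) (ha : 0 ≤ a) (h : ¬(a = 0 ∧ b = 0)) :
    pyGcd a b = ((Int.gcd a b : Nat) : Int) :=
  pyXgcdF_gcd (a.natAbs + 1) a b ha (by omega) h

lemma altXgcdLoopF_spec : ∀ (fuel : Nat) (x y r0 r1 s0 s1 t0 t1 : Int), r1.natAbs < fuel →
    0 ≤ r0 → 0 ≤ r1 → x * s0 + y * t0 = r0 → x * s1 + y * t1 = r1 →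
    (altXgcdLoopF fuel r0 r1 s0 s1 t0 t1).1 = ((Int.gcd r0 r1 : Nat) : Int) ∧
    x * (altXgcdLoopF fuel r0 r1 s0 s1 t0 t1).2.1 +
      y * (altXgcdLoopF fuel r0 r1 s0 s1 t0 t1).2.2 =
      (altXgcdLoopF fuel r0 r1 s0 s1 t0 t1).1 := by
  intro fuel
  induction fuel with
  | zero => intro x y r0 r1 s0 s1 t0 t1 hf _ _ _ _; omega
  | succ fuel ih =>
    intro x y r0 r1 s0 s1 t0 t1 hf h0 h1 hb0 hb1
    rw [show altXgcdLoopF (fuel + 1) r0 r1 s0 s1 t0 t1 =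
      (if r1 = 0 then ((r0, s0, t0) : Int × Int × Int)
      else
        let qq := PySem.Int.floordiv r0 r1
        altXgcdLoopF fuel r1 (r0 - qq * r1) s1 (s0 - qq * s1) t1 (t0 - qq * t1)) from rfl]
    split_ifs with hr
    · subst hr
      refine ⟨?_, hb0⟩
      show r0 = ((Int.gcd r0 0 : Nat) : Int)
      rw [Int.gcd_zero_right]; omega
    · have hrpos : 0 < r1 := lt_of_le_of_ne h1 (Ne.symm hr)
      have hmodeq : r0 - PySem.Int.floordiv r0 r1 * r1 = PySem.Int.mod r0 r1 := by
        have := PySem.Int.floordiv_mul_add_mod r0 r1; linarith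
      dsimp only
      have hrec := ih x y r1 (r0 - PySem.Int.floordiv r0 r1 * r1) s1
        (s0 - PySem.Int.floordiv r0 r1 * s1) t1 (t0 - PySem.Int.floordiv r0 r1 * t1)
        (by rw [hmodeq]; have := natAbs_mod_lt r0 r1 (by omega); omega)
        h1 (by rw [hmodeq]; exact PySem.Int.mod_nonneg r0 hrpos) hb1
        (by linear_combination hb0 - (PySem.Int.floordiv r0 r1) * hb1)
      refine ⟨?_, hrec.2⟩
      rw [hrec.1]
      have hg : Int.gcd r1 (r0 - PySem.Int.floordiv r0 r1 * r1) = Int.gcd r0 r1 := by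
        rw [hmodeq, gcd_mod_right, Int.gcd_comm]
      rw [hg]

lemma altXgcd_spec (x y : Int) (hx : 0 ≤ x) (hy : 0 ≤ y) :
    (altXgcd x y).1 = ((Int.gcd x y : Nat) : Int) ∧
    x * (altXgcd x y).2.1 + y * (altXgcd x y).2.2 = (altXgcd x y).1 := by
  unfold altXgcd
  exact altXgcdLoopF_spec (y.natAbs + 1) x y x y 1 0 0 1 (by omega) hx hy (by ring) (by ring)

-- dict facts ------------------------------------------------------------
lemma dict_ext {κ ν : Type} (d1 d2 : PySem.Dict κ ν) (h : d1.items = d2.items) : d1 = d2 := by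
  cases d1; cases d2; cases h; rfl

lemma dict_insert_insert {ν : Type} (d : PySem.Dict Int ν) (k : Int) (v w : ν) :
    (d.insert k v).insert k w = d.insert k w := by
  apply dict_ext
  by_cases h : d.contains k = true
  · rw [PySem.Dict.items_insert_of_contains _ w (PySem.Dict.contains_insert_self d k v),
        PySem.Dict.items_insert_of_contains d v h, PySem.Dict.items_insert_of_contains d w h,
        List.map_map]
    apply List.map_congr_left
    intro p _
    by_cases hp : p.1 = k <;> simp [Function.comp, hp]
  · have h' : d.contains k = false := by simpa using h
    rw [PySem.Dict.items_insert_of_contains _ w (PySem.Dict.contains_insert_self d k v),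
        PySem.Dict.items_insert_of_not_contains d v h',
        PySem.Dict.items_insert_of_not_contains d w h',
        List.map_append]
    have hmem : ∀ p ∈ d.items, (p.1 == k) = false := by
      intro p hp
      have hk : k ∉ PySem.Dict.keys d := by
        intro hmem; exact h ((PySem.Dict.contains_iff_mem_keys d k).mpr hmem)
      have hne : p.1 ≠ k := by
        intro he; exact hk (by unfold PySem.Dict.keys; exact List.mem_map.mpr ⟨p, hp, he⟩)
      simpa using hne
    have hid : d.items.map (fun p => if (p.1 == k) = true then (k, w) else p) = d.items := by
      have := List.map_congr_left (l := d.items)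
        (f := fun p => if (p.1 == k) = true then (k, w) else p) (g := id)
        (fun p hp => by simp [hmem p hp])
      rw [this, List.map_id]
    rw [hid]; simp

lemma foldl_insert_append (k : Int) (f : Int → List Int) :
    ∀ (M : List Int) (d : PySem.Dict Int (List (List Int))),
    M.foldl (fun d b0 => d.insert k (d.getD k [] ++ [f b0])) d =
      if M = [] then d else d.insert k (d.getD k [] ++ M.map f) := by
  intro M
  induction M with
  | nil => intro d; simp
  | cons m M ih =>
    intro d
    simp only [List.foldl_cons]
    rw [ih]
    rw [if_neg (List.cons_ne_nil m M)]
    by_cases hM : M = []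
    · subst hM; simp
    · rw [if_neg hM, PySem.Dict.getD_insert_self, dict_insert_insert]
      simp

-- A's inner loop computes LA --------------------------------------------
lemma stepA_char (base x : Int) (d : PySem.Dict Int (List (List Int))) :
    stepA base d x =
      if pyGcd (x - 1) (base - 1) ≠ 1 then d
      else if LA base x = [] then d else d.insert x (d.getD x [] ++ LA base x) := by
  unfold stepA
  have key : (PySem.List.pyRange 1 (base - x) 1).foldl (fun d b0 =>
        let br := PySem.Int.mod (x * b0) base
        let l := x + b0 - x * br
        if l < 0 ∨ l ≥ x then d
        else
          let r := PySem.Int.floordiv (x * b0 - br) base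
          d.insert x (d.getD x [] ++ [[br, b0, l, r]])) d
      = if LA base x = [] then d else d.insert x (d.getD x [] ++ LA base x) := by
    rw [PySem.List.foldl_congr_mem _ _
      (fun d b0 => if PA base x b0 then d.insert x (d.getD x [] ++ [fA base x b0]) else d) _
      (by
        intro acc b0 _
        show (if lA base x b0 < 0 ∨ lA base x b0 ≥ x then acc
            else acc.insert x (acc.getD x [] ++ [fA base x b0])) =
          (if PA base x b0 then acc.insert x (acc.getD x [] ++ [fA base x b0]) else acc)
        by_cases h : PA base x b0
        · rw [if_pos h, if_neg (show ¬(lA base x b0 < 0 ∨ lA base x b0 ≥ x) from h)]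
        · rw [if_neg h, if_pos (not_not.mp h)])]
    rw [show (fun (d : PySem.Dict Int (List (List Int))) b0 =>
        if PA base x b0 then d.insert x (d.getD x [] ++ [fA base x b0]) else d) =
      (fun (d : PySem.Dict Int (List (List Int))) b0 =>
        if PA base x b0 then
          (fun (d : PySem.Dict Int (List (List Int))) b0 =>
            d.insert x (d.getD x [] ++ [fA base x b0])) d b0 else d) from rfl]
    rw [PySem.List.foldl_ite_eq_foldl_filter (PA base x)
      (fun (d : PySem.Dict Int (List (List Int))) b0 =>
        d.insert x (d.getD x [] ++ [fA base x b0]))]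
    rw [foldl_insert_append x (fA base x)]
    by_cases hM : (PySem.List.pyRange 1 (base - x) 1).filter (fun b0 => decide (PA base x b0)) = []
    · rw [if_pos hM]
      have hLA : LA base x = [] := by unfold LA; rw [hM]; rfl
      rw [if_pos hLA]
    · rw [if_neg hM]
      have hLA : LA base x ≠ [] := by
        unfold LA; simpa [List.map_eq_nil_iff] using hM
      rw [if_neg hLA]
      rfl
  split_ifs with hg hL
  · rfl
  · rw [key, if_pos hL]
  · rw [key, if_neg hL]

-- block machinery --------------------------------------------------------
lemma pairwise_lt_pyRange_pos (a b s : Int) (hs : 0 < s) :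
    (PySem.List.pyRange a b s).Pairwise (· < ·) := by
  rw [PySem.List.pyRange_of_pos a b hs]
  refine List.pairwise_map.mpr (List.pairwise_lt_range.imp ?_)
  intro k k' hkk
  have : s * (k : Int) < s * (k' : Int) :=
    mul_lt_mul_of_pos_left (by exact_mod_cast hkk) hs
  omega

lemma blocks_prefix (base x : Int) (hx : 1 ≤ x) :
    ∀ n : Nat, 1 ≤ n →
    (PySem.List.pyRange 0 (n : Int) 1).flatMap
      (fun q => PySem.List.pyRange (max (x * q) 1) (min (x * q + x - 1) (base - x - 1) + 1) 1) =
    PySem.List.pyRange 1 (min (x * (n : Int) - 1) (base - x - 1) + 1) 1 := by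
  intro n hn
  induction n with
  | zero => omega
  | succ n ih =>
    by_cases hn1 : n = 0
    · subst hn1
      rw [show ((1 : Nat) : Int) = 1 from rfl]
      rw [PySem.List.pyRange_one_cons (by norm_num),
        PySem.List.pyRange_one_eq_nil (by norm_num : (1 : Int) ≤ 0 + 1)]
      simp only [List.flatMap_cons, List.flatMap_nil, List.append_nil]
      norm_num
    · have hn' : 1 ≤ n := by omega
      have hcast : ((n + 1 : Nat) : Int) = (n : Int) + 1 := by push_cast; ring
      rw [hcast, PySem.List.pyRange_one_succ_right (by positivity), List.flatMap_append, ih hn']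
      simp only [List.flatMap_cons, List.flatMap_nil, List.append_nil]
      have hxn : 1 ≤ x * (n : Int) := by
        have h1 : (1 : Int) ≤ (n : Int) := by exact_mod_cast hn'
        nlinarith
      have hmax : max (x * (n : Int)) 1 = x * (n : Int) := max_eq_left hxn
      have hexp : x * ((n : Int) + 1) = x * (n : Int) + x := by ring
      rw [hmax, hexp]
      by_cases hcase : x * (n : Int) - 1 ≤ base - x - 1
      · rw [min_eq_left hcase]
        have h2 : min (x * (n : Int) + x - 1) (base - x - 1) + 1 ≥ x * (n : Int) := by
          rcases le_total (x * (n : Int) + x - 1) (base - x - 1) with h | h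
          · rw [min_eq_left h]; omega
          · rw [min_eq_right h]; omega
        rw [show x * (n : Int) - 1 + 1 = x * (n : Int) by ring]
        exact (PySem.List.pyRange_one_append 1 (x * (n : Int))
          (min (x * (n : Int) + x - 1) (base - x - 1) + 1) (by omega) h2).symm
      · push_neg at hcase
        rw [min_eq_right (by omega : base - x - 1 ≤ x * (n : Int) - 1)]
        rw [min_eq_right (by omega : base - x - 1 ≤ x * (n : Int) + x - 1)]
        rw [PySem.List.pyRange_one_eq_nil (by omega : base - x - 1 + 1 ≤ x * (n : Int))]
        simp

lemma block_partition (base x : Int) (hx : 1 ≤ x) (hxb : x < base) :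
    PySem.List.pyRange 1 (base - x) 1 =
      (PySem.List.pyRange 0 (PySem.Int.floordiv (base - x - 1) x + 1) 1).flatMap
        (fun q => PySem.List.pyRange (max (x * q) 1) (min (x * q + x - 1) (base - x - 1) + 1) 1) := by
  have hxpos : (0 : Int) < x := by omega
  set Q := PySem.Int.floordiv (base - x - 1) x with hQ
  have hQ0 : 0 ≤ Q := by
    rw [hQ, PySem.Int.floordiv_eq_ediv_of_pos hxpos]
    exact Int.ediv_nonneg (by omega) (by omega)
  have hQup : base - x - 1 < (Q + 1) * x := by
    have := (PySem.Int.floordiv_lt_iff_lt_mul (a := base - x - 1) (q := Q + 1) hxpos).mp (by omega)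
    exact this
  have hcast : ((Q + 1).toNat : Int) = Q + 1 := by omega
  have := blocks_prefix base x hx (Q + 1).toNat (by omega)
  rw [hcast] at this
  rw [this]
  have hmin : min (x * (Q + 1) - 1) (base - x - 1) = base - x - 1 := by
    have : x * (Q + 1) = (Q + 1) * x := by ring
    omega
  rw [hmin]
  congr 1
  omega

-- the central per-block lemma
lemma block_eq (base x : Int) (hx : 1 ≤ x) (hxb : x < base) (q : Int)
    (hq0 : 0 ≤ q) (hq : x * q ≤ base - x - 1) :
    ((PySem.List.pyRange (max (x * q) 1) (min (x * q + x - 1) (base - x - 1) + 1) 1).filter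
        (fun b0 => decide (PA base x b0))).map (fA base x) =
      (if PySem.Int.mod (q + 1) (altXgcd x base).1 = 0 then
        (PySem.List.pyRange
          (max (x * q) 1 + PySem.Int.mod
            (PySem.Int.mod ((altXgcd x base).2.1 * PySem.Int.floordiv (q + 1) (altXgcd x base).1)
              (PySem.Int.floordiv base (altXgcd x base).1) - max (x * q) 1)
            (PySem.Int.floordiv base (altXgcd x base).1))
          (min (x * q + x - 1) (base - x - 1) + 1)
          (PySem.Int.floordiv base (altXgcd x base).1)).map
          (fun b0 => [q + 1, b0, b0 - x * q, PySem.Int.floordiv (x * b0 - (q + 1)) base])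
      else []) := by
  have hbase : (0 : Int) < base := by omega
  obtain ⟨hgc, hbez⟩ := altXgcd_spec x base (by omega) (by omega)
  set g := (altXgcd x base).1 with hgdef
  set u := (altXgcd x base).2.1 with hudef
  set v := (altXgcd x base).2.2 with hvdef
  have hgpos : 0 < g := by
    rw [hgc]
    have hne : Int.gcd x base ≠ 0 := fun hz => by
      rw [Int.gcd_eq_zero_iff] at hz; obtain ⟨h1, _⟩ := hz; omega
    exact_mod_cast Nat.pos_of_ne_zero hne
  have hgdvdx : g ∣ x := by rw [hgc]; exact Int.gcd_dvd_left x base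
  have hgdvdb : g ∣ base := by rw [hgc]; exact Int.gcd_dvd_right x base
  set step := PySem.Int.floordiv base g with hstepdef
  have hstep_eq : step = base / g := PySem.Int.floordiv_eq_ediv_of_pos hgpos
  have hgs : g * step = base := by rw [hstep_eq]; exact Int.mul_ediv_cancel' hgdvdb
  have hsteppos : 0 < step := by nlinarith
  have hq1 : q ≤ x * q := by nlinarith
  have hrhsb : q + 1 < base := by omega
  set lo := max (x * q) 1 with hlodef
  set hi := min (x * q + x - 1) (base - x - 1) with hhidef
  have hlo1 : x * q ≤ lo := le_max_left _ _
  have hlo2 : 1 ≤ lo := le_max_right _ _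
  have hPAiff : ∀ b0, lo ≤ b0 → b0 ≤ hi →
      (PA base x b0 ↔ PySem.Int.mod (x * b0) base = q + 1) := by
    intro b0 h1 h2
    have hb1 : x * q ≤ b0 := le_trans hlo1 h1
    have hb2 : b0 ≤ x * q + x - 1 := le_trans h2 (min_le_left _ _)
    unfold PA lA brA
    set br := PySem.Int.mod (x * b0) base with hbr
    have hxq2 : x * (q + 2) = x * q + 2 * x := by ring
    constructor
    · intro h
      push_neg at h
      obtain ⟨hl0, hl1⟩ := h
      have k1 : x * br < x * (q + 2) := by omega
      have k2 : x * (q + 1) < x * (br + 1) := by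
        have e1 : x * (br + 1) = x * br + x := by ring
        have e2 : x * (q + 1) = x * q + x := by ring
        omega
      have c1 := lt_of_mul_lt_mul_left k1 (by omega : (0 : Int) ≤ x)
      have c2 := lt_of_mul_lt_mul_left k2 (by omega : (0 : Int) ≤ x)
      omega
    · intro h
      rw [h]
      have e2 : x * (q + 1) = x * q + x := by ring
      omega
  by_cases hdvd : PySem.Int.mod (q + 1) g = 0
  case neg =>
    rw [if_neg hdvd]
    apply List.map_eq_nil_iff.mpr
    apply List.filter_eq_nil_iff.mpr
    intro b0 hb0mem hdec
    have hPAb := of_decide_eq_true hdec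
    have hmem := PySem.List.mem_pyRange_one.mp hb0mem
    have hmod := (hPAiff b0 hmem.1 (by omega)).mp hPAb
    have hb : base ∣ x * b0 - (q + 1) := by
      rw [PySem.Int.mod_eq_emod_of_pos hbase] at hmod
      have h2 : (x * b0) % base = (q + 1) % base := by
        rw [hmod, Int.emod_eq_of_lt (by omega) hrhsb]
      exact Int.dvd_of_emod_eq_zero (Int.emod_eq_emod_iff_emod_sub_eq_zero.mp h2)
    have hgq : g ∣ q + 1 := by
      have h1 : g ∣ x * b0 := Dvd.dvd.mul_right hgdvdx b0
      have h2 : g ∣ x * b0 - (q + 1) := dvd_trans hgdvdb hb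
      have h3 : g ∣ x * b0 - (x * b0 - (q + 1)) := dvd_sub h1 h2
      simpa using h3
    exact hdvd ((PySem.Int.mod_eq_zero_iff_dvd _ _).mpr hgq)
  case pos =>
    rw [if_pos hdvd]
    have hgr : g ∣ q + 1 := (PySem.Int.mod_eq_zero_iff_dvd _ _).mp hdvd
    set e := PySem.Int.floordiv (q + 1) g with hedef
    have he : g * e = q + 1 := by
      rw [hedef, PySem.Int.floordiv_eq_ediv_of_pos hgpos]
      exact Int.mul_ediv_cancel' hgr
    set x0 := PySem.Int.mod (u * e) step with hx0def
    obtain ⟨x', hx'⟩ := hgdvdx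
    have hxstep : x * step = x' * base := by rw [hx', ← hgs]; ring
    have hx0cong : base ∣ x * x0 - (q + 1) := by
      have hfl := PySem.Int.floordiv_mul_add_mod (u * e) step
      have hc : u * e - x0 = PySem.Int.floordiv (u * e) step * step := by
        rw [hx0def]; linarith
      set c := PySem.Int.floordiv (u * e) step with hcdef
      refine ⟨-(v * e) - x' * c, ?_⟩
      have h1 : x * u = g - base * v := by linarith [hbez]
      calc x * x0 - (q + 1) = x * (u * e) - x * (u * e - x0) - (q + 1) := by ring
        _ = (x * u) * e - (x * step) * c - (q + 1) := by rw [hc]; ring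
        _ = (g - base * v) * e - (x' * base) * c - (q + 1) := by rw [h1, hxstep]
        _ = (g * e) - base * (v * e) - (x' * base) * c - (q + 1) := by ring
        _ = base * (-(v * e) - x' * c) := by rw [he]; ring
    have hchar : ∀ b0, (PySem.Int.mod (x * b0) base = q + 1 ↔ step ∣ (b0 - x0)) := by
      intro b0
      rw [PySem.Int.mod_eq_emod_of_pos hbase]
      constructor
      · intro h
        have hb : base ∣ x * b0 - (q + 1) := by
          have h2 : (x * b0) % base = (q + 1) % base := by
            rw [h, Int.emod_eq_of_lt (by omega) hrhsb]
          exact Int.dvd_of_emod_eq_zero (Int.emod_eq_emod_iff_emod_sub_eq_zero.mp h2)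
        have hd2 : base ∣ x * (b0 - x0) := by
          have hrw : x * (b0 - x0) = (x * b0 - (q + 1)) - (x * x0 - (q + 1)) := by ring
          rw [hrw]; exact dvd_sub hb hx0cong
        have hdg : g * step ∣ g * (x' * (b0 - x0)) := by
          rw [hgs]
          have hrw : g * (x' * (b0 - x0)) = x * (b0 - x0) := by rw [hx']; ring
          rw [hrw]; exact hd2
        have hsd : step ∣ x' * (b0 - x0) := (mul_dvd_mul_iff_left (ne_of_gt hgpos)).mp hdg
        have hcop : Int.gcd x' step = 1 := by
          have h0 : 0 < Int.gcd x base := by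
            have := hgpos; rw [hgc] at this; exact_mod_cast this
          have hgl := Int.gcd_div_gcd_div_gcd h0
          have hx'' : x' = x / ((Int.gcd x base : Nat) : Int) := by
            rw [← hgc, hx', Int.mul_ediv_cancel_left _ (ne_of_gt hgpos)]
          rw [hx'', hstep_eq, hgc]
          exact hgl
        have hco : IsCoprime step x' :=
          Int.isCoprime_iff_gcd_eq_one.mpr (by rw [Int.gcd_comm]; exact hcop)
        exact hco.dvd_of_dvd_mul_left hsd
      · rintro ⟨w, hw⟩
        have hb : base ∣ x * b0 - (q + 1) := by
          obtain ⟨z, hz⟩ := hx0cong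
          have h3 : x * (b0 - x0) = x' * base * w := by
            rw [hw, ← hxstep]; ring
          exact ⟨z + x' * w, by linear_combination hz + h3⟩
        have h2 : (x * b0) % base = (q + 1) % base :=
          Int.emod_eq_emod_iff_emod_sub_eq_zero.mpr (Int.emod_eq_zero_of_dvd hb)
        rw [h2, Int.emod_eq_of_lt (by omega) hrhsb]
    set first := lo + PySem.Int.mod (x0 - lo) step with hfirstdef
    have hm1 : 0 ≤ PySem.Int.mod (x0 - lo) step := PySem.Int.mod_nonneg _ hsteppos
    have hm2 : PySem.Int.mod (x0 - lo) step < step := PySem.Int.mod_lt _ hsteppos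
    have hfl2 := PySem.Int.floordiv_mul_add_mod (x0 - lo) step
    have hfirstcong : step ∣ first - x0 :=
      ⟨-(PySem.Int.floordiv (x0 - lo) step), by rw [hfirstdef]; linarith⟩
    have hmemiff : ∀ b0,
        b0 ∈ (PySem.List.pyRange lo (hi + 1) 1).filter (fun b0 => decide (PA base x b0)) ↔
        b0 ∈ PySem.List.pyRange first (hi + 1) step := by
      intro b0
      rw [List.mem_filter, PySem.List.mem_pyRange_one, PySem.List.mem_pyRange_iff_of_pos hsteppos]
      constructor
      · rintro ⟨⟨hb1, hb2⟩, hdec⟩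
        have hPAb := of_decide_eq_true hdec
        have hmod := (hPAiff b0 hb1 (by omega)).mp hPAb
        have hstepd : step ∣ b0 - x0 := (hchar b0).mp hmod
        have hdf : step ∣ b0 - first := by
          have hrw : b0 - first = (b0 - x0) - (first - x0) := by ring
          rw [hrw]; exact dvd_sub hstepd hfirstcong
        refine ⟨?_, hb2, hdf⟩
        by_contra hlt
        push_neg at hlt
        have hpos : 0 < first - b0 := by omega
        have hd : step ∣ first - b0 := by
          have hrw : first - b0 = -(b0 - first) := by ring
          rw [hrw]; exact dvd_neg.mpr hdf
        have := Int.le_of_dvd hpos hd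
        omega
      · rintro ⟨hb1, hb2, hdf⟩
        have hb1' : lo ≤ b0 := by omega
        have hstepd : step ∣ b0 - x0 := by
          have hrw : b0 - x0 = (b0 - first) + (first - x0) := by ring
          rw [hrw]; exact dvd_add hdf hfirstcong
        have hmod := (hchar b0).mpr hstepd
        exact ⟨⟨hb1', hb2⟩, decide_eq_true ((hPAiff b0 hb1' (by omega)).mpr hmod)⟩
    have hlisteq : (PySem.List.pyRange lo (hi + 1) 1).filter (fun b0 => decide (PA base x b0)) =
        PySem.List.pyRange first (hi + 1) step := by
      have hp1 : ((PySem.List.pyRange lo (hi + 1) 1).filter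
          (fun b0 => decide (PA base x b0))).Pairwise (· < ·) :=
        (PySem.List.pairwise_lt_pyRange_one lo (hi + 1)).filter _
      have hp2 := pairwise_lt_pyRange_pos first (hi + 1) step hsteppos
      have hn1 : ((PySem.List.pyRange lo (hi + 1) 1).filter
          (fun b0 => decide (PA base x b0))).Nodup := hp1.imp (fun h => ne_of_lt h)
      have hn2 : (PySem.List.pyRange first (hi + 1) step).Nodup := hp2.imp (fun h => ne_of_lt h)
      exact List.eq_of_perm_of_sorted (fun a b _ _ hab hba => absurd hba (lt_asymm hab))
        hp1 hp2 ((List.perm_ext_iff_of_nodup hn1 hn2).mpr hmemiff)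
    rw [hlisteq]
    apply List.map_congr_left
    intro b0 hb0
    have hmem := (PySem.List.mem_pyRange_iff_of_pos hsteppos b0).mp hb0
    have hmod : PySem.Int.mod (x * b0) base = q + 1 := (hchar b0).mpr (by
      have hrw : b0 - x0 = (b0 - first) + (first - x0) := by ring
      rw [hrw]; exact dvd_add hmem.2.2 hfirstcong)
    unfold fA lA brA
    rw [hmod]
    rw [show x + b0 - x * (q + 1) = b0 - x * q from by ring]

lemma LA_eq_LB (base x : Int) (hx : 1 ≤ x) (hxb : x < base) : LA base x = LB base x := by
  have hxpos : (0 : Int) < x := by omega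
  unfold LA LB
  rw [PySem.List.foldl_congr_mem _ _
    (fun sols q => sols ++
      (if PySem.Int.mod (q + 1) (altXgcd x base).1 = 0 then
        (PySem.List.pyRange
          (max (x * q) 1 + PySem.Int.mod
            (PySem.Int.mod ((altXgcd x base).2.1 * PySem.Int.floordiv (q + 1) (altXgcd x base).1)
              (PySem.Int.floordiv base (altXgcd x base).1) - max (x * q) 1)
            (PySem.Int.floordiv base (altXgcd x base).1))
          (min (x * q + x - 1) (base - x - 1) + 1)
          (PySem.Int.floordiv base (altXgcd x base).1)).map
          (fun b0 => [q + 1, b0, b0 - x * q, PySem.Int.floordiv (x * b0 - (q + 1)) base])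
      else [])) _
    (by
      intro acc q _
      dsimp only
      by_cases hc : PySem.Int.mod (q + 1) (altXgcd x base).1 = 0
      · rw [if_pos hc, if_pos hc, PySem.List.foldl_append_singleton_eq_map]
      · rw [if_neg hc, if_neg hc, List.append_nil])]
  rw [PySem.List.foldl_append_eq_flatMap, List.nil_append]
  rw [block_partition base x hx hxb, List.filter_flatMap, List.map_flatMap]
  apply List.flatMap_congr
  intro q hq
  have hmem := PySem.List.mem_pyRange_one.mp hq
  have hq0 : 0 ≤ q := hmem.1
  have hqle : x * q ≤ base - x - 1 := by
    have h1 : q ≤ PySem.Int.floordiv (base - x - 1) x := by omega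
    have h2 := (PySem.Int.le_floordiv_iff_mul_le hxpos).mp h1
    have h3 : x * q = q * x := mul_comm x q
    omega
  exact block_eq base x hx hxb q hq0 hqle

lemma LA_nil_of_not_range (base x : Int) (h : ¬(1 ≤ x ∧ x < base)) : LA base x = [] := by
  unfold LA
  by_cases hx : 1 ≤ x
  · have hxb : base ≤ x := by omega
    rw [PySem.List.pyRange_one_eq_nil (by omega : base - x ≤ 1)]
    rfl
  · apply List.map_eq_nil_iff.mpr
    apply List.filter_eq_nil_iff.mpr
    intro b0 _ hdec
    have hPAb := of_decide_eq_true hdec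
    unfold PA at hPAb
    push_neg at hPAb
    omega

-- the two step functions agree on fresh keys -----------------------------
lemma step_eq (base x : Int) (d : PySem.Dict Int (List (List Int)))
    (hx : d.contains x = false) : stepA base d x = stepB base d x := by
  by_cases hr : 1 ≤ x ∧ x < base
  · obtain ⟨hx1, hxb⟩ := hr
    rw [stepA_char]
    show _ = (if ¬(1 ≤ x ∧ x < base) then d
      else if altGcd (x - 1) (base - 1) ≠ 1 then d
      else if LB base x ≠ [] then d.insert x (LB base x) else d)
    conv_rhs => rw [if_neg (not_not_intro ⟨hx1, hxb⟩)]
    have hgcd : pyGcd (x - 1) (base - 1) = altGcd (x - 1) (base - 1) := by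
      rw [pyGcd_eq _ _ (by omega) (by rintro ⟨_, h2⟩; omega), altGcd_eq]
    rw [hgcd]
    split_ifs with hg hL hL' hL2
    · rfl
    · exfalso; apply hL'; rw [← LA_eq_LB base x hx1 hxb]; exact hL
    · rfl
    · rw [PySem.Dict.getD_of_not_contains d [] hx, LA_eq_LB base x hx1 hxb]
      simp
    · exfalso; apply hL; rw [LA_eq_LB base x hx1 hxb]; exact not_not.mp hL2
  · show _ = (if ¬(1 ≤ x ∧ x < base) then d
      else if altGcd (x - 1) (base - 1) ≠ 1 then d
      else if LB base x ≠ [] then d.insert x (LB base x) else d)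
    rw [if_pos hr, stepA_char]
    have hLA := LA_nil_of_not_range base x hr
    rw [hLA]
    split_ifs with h1 h2
    · rfl
    · rfl
    · exact absurd rfl h2

lemma fold_eq (base : Int) :
    ∀ (aa : List Int) (d : PySem.Dict Int (List (List Int))), aa.Nodup →
      (∀ x ∈ aa, d.contains x = false) →
      aa.foldl (stepA base) d = aa.foldl (stepB base) d := by
  intro aa
  induction aa with
  | nil => intro d _ _; rfl
  | cons x aa ih =>
    intro d hnd hcont
    simp only [List.foldl_cons]
    rw [step_eq base x d (hcont x (by simp))]
    refine ih _ (List.Nodup.of_cons hnd) ?_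
    intro y hy
    have hyx : y ≠ x := by
      rcases List.nodup_cons.mp hnd with ⟨hnx, _⟩
      intro he; subst he; exact hnx hy
    have hyd := hcont y (by simp [hy])
    unfold stepB
    dsimp only
    split_ifs <;>
      first
        | exact hyd
        | (rw [PySem.Dict.contains_insert]; simp [hyx, hyd])

-- ===== VERDICT (by name: the statement is the Claim_ definition above) =====
theorem recursion_start_spec : Claim_equal_recursion_start := by
  intro base a _ _
  unfold Spec_recursion_start
  have h : ∀ (aa : List Int), aa.Nodup →
      ((aa.foldl (stepA base) PySem.Dict.empty).items =
        (aa.foldl (stepB base) PySem.Dict.empty).items) := by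
    intro aa hnd
    rw [fold_eq base aa PySem.Dict.empty hnd (fun x _ => PySem.Dict.contains_empty x)]
  cases a with
  | none => exact h (PySem.List.pyRange 1 base 1) (PySem.List.nodup_pyRange_one 1 base)
  | some x => exact h [x] (List.nodup_singleton x)
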